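-- pv_equiv track=rewrite | github.com/claire-d-b/dslr | exercises/utils.py | hard_clean
-- ===== SOURCE A (Python) =====
-- def hard_clean(X, Y):
--     clean_X = {}
--     clean_Y = []
--     for key in X:
--         clean_X[key] = []
--     for idx, _ in enumerate(X[next(iter(X))]):
--         nan = False
--         for key in X:
--             if X[key][idx] == "NaN":
--                 nan = True
--                 break
--         if nan == False:
--             clean_Y.append(Y[idx])
--             for key in X:
--                 clean_X[key].append(X[key][idx])
--     return clean_X, clean_Y
-- ===== SOURCE B (Python) =====
-- def hard_clean(X, Y):
--     keys = list(X)
--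
--     def go(cols, ys, n):
--         # consume one row at a time from the heads of the columns,
--         # recurse on the tails, and prepend kept rows to the result
--         if n == 0:
--             return [[] for _ in keys], []
--         heads = [c[0] for c in cols]
--         rest_cols, rest_ys = go([c[1:] for c in cols], ys[1:], n - 1)
--         if "NaN" in heads:
--             return rest_cols, rest_ys
--         return [[h] + r for h, r in zip(heads, rest_cols)], [ys[0]] + rest_ys
--
--     n = len(X[next(iter(X))])
--     cols, cy = go([X[k] for k in keys], Y, n)
--     return dict(zip(keys, cols)), cy
-- ===== Notes on version B (the rewrite author's own statement) =====
-- stated objective: alternative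
-- what changed: A's iterative indexed loop (for each row index, test every column by random access and append to per-key lists and clean_Y in place) is replaced by a structural recursion that pops one row off the heads of all columns at a time, recurses on the column tails, and builds the cleaned columns and labels back-to-front by prepending kept rows; no index arithmetic or in-place accumulation remains.
-- outside the precondition, e.g. on hard_clean({'a': ['NaN'], 'b': []}, []): A returns ({'a': [], 'b': []}, []), B raises IndexError; on hard_clean({'a': ['1', '2']}, ['y']): A raises IndexError, B raises IndexError
import Mathlib
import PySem

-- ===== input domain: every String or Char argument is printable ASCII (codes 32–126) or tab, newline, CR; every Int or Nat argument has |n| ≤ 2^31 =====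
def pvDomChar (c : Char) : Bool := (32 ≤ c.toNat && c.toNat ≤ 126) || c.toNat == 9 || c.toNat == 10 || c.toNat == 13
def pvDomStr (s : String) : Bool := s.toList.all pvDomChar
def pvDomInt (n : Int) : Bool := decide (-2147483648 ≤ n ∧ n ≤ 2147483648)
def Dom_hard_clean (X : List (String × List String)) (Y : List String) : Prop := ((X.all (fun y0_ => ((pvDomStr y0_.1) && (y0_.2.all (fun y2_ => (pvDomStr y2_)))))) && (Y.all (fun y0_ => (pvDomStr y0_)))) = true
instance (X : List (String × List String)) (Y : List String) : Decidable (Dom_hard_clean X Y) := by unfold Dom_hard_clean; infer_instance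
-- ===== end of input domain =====

-- B replaces A's indexed row loop with in-place appends by a structural recursion that
-- pops one row off the heads of all columns, recurses on the tails, and builds the
-- cleaned columns and labels back-to-front (alternative decomposition, same cost).
-- The dict argument/result are association lists with unique keys (a Python dict).

-- ===== PORT A =====
-- X[k] : assoc-list lookup, first match (keys of a Python dict are unique)
def aGet (X : List (String × List String)) (k : String) : List String :=
  ((X.find? (fun p => p.1 == k)).map Prod.snd).getD []

-- d[k] = v on a dict-as-assoc-list: overwrite the existing entry, else append
def aInsert (d : List (String × List String)) (k : String) (v : List String) :
    List (String × List String) :=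
  match d with
  | [] => [(k, v)]
  | p :: rest => if p.1 == k then (k, v) :: rest else p :: aInsert rest k v

-- clean_X[k].append(v): modify the entry at k in place (k is always present)
def aAppendAt (d : List (String × List String)) (k : String) (v : String) :
    List (String × List String) :=
  d.map (fun q => if q.1 == k then (q.1, q.2 ++ [v]) else q)

-- the body of the row loop (for idx, _ in enumerate(firstCol))
def stepA (X : List (String × List String)) (Y : List String)
    (st : (List (String × List String)) × List String) (idx : Nat) :
    (List (String × List String)) × List String :=
  let nan := X.any (fun p => PySem.List.pyGetD (aGet X p.1) (idx : Int) "" == "NaN")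
  if nan = false then
    (X.foldl (fun d p => aAppendAt d p.1 (PySem.List.pyGetD (aGet X p.1) (idx : Int) "")) st.1,
     st.2 ++ [PySem.List.pyGetD Y (idx : Int) ""])
  else st

def hard_clean (X : List (String × List String)) (Y : List String) :
    (List (String × List String)) × List String :=
  -- clean_X = {}; for key in X: clean_X[key] = []
  let cleanX0 := X.foldl (fun d p => aInsert d p.1 []) []
  -- X[next(iter(X))]  (Pre_ excludes empty X, where Python raises StopIteration)
  let firstCol := aGet X ((X.headD ("", [])).1)
  -- for idx, _ in enumerate(firstCol): idx runs over range(len(firstCol))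
  (List.range firstCol.length).foldl (stepA X Y) (cleanX0, [])

-- ===== PORT B =====
-- go(cols, ys, n): c[0]/ys[0] are ported with pyGetD (exact under Pre_, which keeps
-- every index in range); c[1:]/ys[1:] are List.tail (Python's slice never raises)
def goB (kn : Nat) (cols : List (List String)) (ys : List String) :
    Nat → (List (List String)) × List String
  | 0 => (List.replicate kn [], [])             -- [[] for _ in keys], []
  | n + 1 =>
    let heads := cols.map (fun c => PySem.List.pyGetD c (0 : Int) "")
    let r := goB kn (cols.map List.tail) ys.tail n
    if heads.contains "NaN" then r
    else ((heads.zip r.1).map (fun p => p.1 :: p.2),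
          PySem.List.pyGetD ys (0 : Int) "" :: r.2)

def hard_clean_alt (X : List (String × List String)) (Y : List String) :
    (List (String × List String)) × List String :=
  let keys := X.map Prod.fst
  -- n = len(X[next(iter(X))])
  let n := (aGet X ((X.headD ("", [])).1)).length
  let r := goB keys.length (keys.map (fun k => aGet X k)) Y n
  -- dict(zip(keys, cols)), cy  (keys are unique, so the dict is the zipped assoc list)
  (keys.zip r.1, r.2)

-- ===== PRECONDITION & SPEC =====
-- Pre_ excludes: the empty dict (A raises StopIteration); duplicate keys (unrepresentable
-- in the Python dict argument); and inputs where some column or Y is shorter than the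
-- first column, on which A's IndexError-or-return depends on where the NaNs fall.
def Pre_hard_clean (X : List (String × List String)) (Y : List String) : Prop :=
  X ≠ [] ∧ (X.map Prod.fst).Nodup ∧
  (∀ q ∈ X, (X.headD ("", [])).2.length ≤ q.2.length) ∧
  (X.headD ("", [])).2.length ≤ Y.length
instance (X : List (String × List String)) (Y : List String) : Decidable (Pre_hard_clean X Y) := by
  unfold Pre_hard_clean; infer_instance

def pvWitness_hard_clean : (List (String × List String)) × List String :=
  ([("a", ["1", "NaN"]), ("b", ["2", "3"])], ["y0", "y1"])

def Spec_hard_clean (X : List (String × List String)) (Y : List String) (out : (List (String × List String)) × List String) : Prop := out = hard_clean_alt X Y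
instance (X : List (String × List String)) (Y : List String) (out : (List (String × List String)) × List String) : Decidable (Spec_hard_clean X Y out) := by unfold Spec_hard_clean; infer_instance

-- ===== CLAIM (what is proved, stated in full; the proofs are below) =====
def Claim_equal_hard_clean : Prop := ∀ (X : List (String × List String)) (Y : List String), Dom_hard_clean X Y → Pre_hard_clean X Y → Spec_hard_clean X Y (hard_clean X Y)

-- ===== LEMMAS AND PROOFS =====

-- the surviving row indices, as a filter over range n (proof-side characterisation)
def goodF (cols : List (List String)) (n : Nat) : List Nat :=
  (List.range n).filter
    (fun i => cols.all (fun c => !(PySem.List.pyGetD c (i : Int) "" == "NaN")))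

-- a key absent from d: aInsert appends
theorem aInsert_not_mem (d : List (String × List String)) (k : String) (v : List String)
    (h : k ∉ d.map Prod.fst) : aInsert d k v = d ++ [(k, v)] := by
  induction d with
  | nil => rfl
  | cons p rest ih =>
    simp only [List.map_cons, List.mem_cons, not_or] at h
    simp [aInsert, beq_iff_eq, Ne.symm h.1, ih h.2]

-- building clean_X: inserting fresh distinct keys appends them in order
theorem foldl_aInsert_fresh (L : List (String × List String)) :
    ∀ d : List (String × List String), (L.map Prod.fst).Nodup →
    (∀ p ∈ L, p.1 ∉ d.map Prod.fst) →
    L.foldl (fun d p => aInsert d p.1 []) d = d ++ L.map (fun p => (p.1, [])) := by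
  induction L with
  | nil => intro d _ _; simp
  | cons p rest ih =>
    intro d hnd hfresh
    simp only [List.map_cons, List.nodup_cons] at hnd
    simp only [List.foldl_cons]
    rw [aInsert_not_mem d p.1 [] (hfresh p (by simp)), ih _ hnd.2, List.append_assoc]
    · simp
    · intro q hq
      simp only [List.map_append, List.mem_append, List.map_cons, List.map_nil,
        List.mem_singleton, not_or]
      refine ⟨hfresh q (by simp [hq]), ?_⟩
      intro hqk
      exact hnd.1 (hqk ▸ List.mem_map_of_mem hq)

-- with unique keys, first-match lookup of a member's key returns its value
theorem aGet_of_nodup (X : List (String × List String)) (hnd : (X.map Prod.fst).Nodup) :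
    ∀ p ∈ X, aGet X p.1 = p.2 := by
  induction X with
  | nil => intro p hp; cases hp
  | cons q rest ih =>
    simp only [List.map_cons, List.nodup_cons] at hnd
    intro p hp
    rcases List.mem_cons.mp hp with hp | hp
    · subst hp; simp [aGet]
    · have hne : q.1 ≠ p.1 := fun h => hnd.1 (h ▸ List.mem_map_of_mem hp)
      have hstep : aGet (q :: rest) p.1 = aGet rest p.1 := by
        simp [aGet, beq_iff_eq, hne]
      rw [hstep]; exact ih hnd.2 p hp

-- a fold of maps is the map of the pointwise fold
theorem foldl_map_eq_map_foldl {α β : Type} (u : α → β → β) (L : List α) :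
    ∀ d : List β, L.foldl (fun d p => d.map (u p)) d = d.map (fun q => L.foldl (fun q p => u p q) q) := by
  induction L with
  | nil => intro d; simp
  | cons p rest ih => intro d; simp [List.foldl_cons, ih, List.map_map, Function.comp]

-- pointwise update fold: no key match leaves the pair unchanged
theorem foldl_upd_none (g : String × List String → String) (L : List (String × List String)) :
    ∀ (k : String) (l : List String), k ∉ L.map Prod.fst →
    L.foldl (fun (q : String × List String) p => if q.1 == p.1 then (q.1, q.2 ++ [g p]) else q) (k, l) = (k, l) := by
  induction L with
  | nil => intro k l _; rfl
  | cons p rest ih =>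
    intro k l h
    simp only [List.map_cons, List.mem_cons, not_or] at h
    simp only [List.foldl_cons]
    rw [if_neg (show ¬((k == p.1) = true) by simp [h.1])]
    exact ih k l h.2

-- pointwise update fold: exactly one key match appends exactly once
theorem foldl_upd_single (g : String × List String → String) (L : List (String × List String)) :
    ∀ (p₀ : String × List String) (l : List String), (L.map Prod.fst).Nodup → p₀ ∈ L →
    L.foldl (fun (q : String × List String) p => if q.1 == p.1 then (q.1, q.2 ++ [g p]) else q) (p₀.1, l) = (p₀.1, l ++ [g p₀]) := by
  induction L with
  | nil => intro p₀ l _ h; cases h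
  | cons p rest ih =>
    intro p₀ l hnd hp₀
    simp only [List.map_cons, List.nodup_cons] at hnd
    rcases List.mem_cons.mp hp₀ with hp₀ | hp₀
    · subst hp₀
      simp only [List.foldl_cons]
      rw [if_pos (show (p₀.1 == p₀.1) = true by simp)]
      exact foldl_upd_none g rest p₀.1 (l ++ [g p₀]) hnd.1
    · have hne : p₀.1 ≠ p.1 := fun h => hnd.1 (h ▸ List.mem_map_of_mem hp₀)
      simp only [List.foldl_cons]
      rw [if_neg (show ¬((p₀.1 == p.1) = true) by simp [hne])]
      exact ih p₀ l hnd.2 hp₀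

-- one good row: the append-to-every-column pass appends g p to each entry
theorem appendAll (X : List (String × List String)) (hnd : (X.map Prod.fst).Nodup)
    (f : String × List String → List String) (g : String × List String → String) :
    X.foldl (fun d p => aAppendAt d p.1 (g p)) (X.map (fun p => (p.1, f p)))
      = X.map (fun p => (p.1, f p ++ [g p])) := by
  have h1 := foldl_map_eq_map_foldl
    (fun (p : String × List String) (q : String × List String) =>
      if q.1 == p.1 then (q.1, q.2 ++ [g p]) else q) X (X.map (fun p => (p.1, f p)))
  have h2 : (fun d (p : String × List String) => aAppendAt d p.1 (g p))
      = (fun d p => d.map (fun q => if q.1 == p.1 then (q.1, q.2 ++ [g p]) else q)) := rfl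
  rw [h2, h1, List.map_map]
  refine List.map_congr_left ?_
  intro p hp
  exact foldl_upd_single g X p (f p) hnd hp

-- the step on a good row (no NaN anywhere) appends everywhere
theorem stepA_good (X : List (String × List String)) (Y : List String)
    (d : List (String × List String)) (ys : List String) (i : Nat)
    (h : (X.all (fun p => !(PySem.List.pyGetD (aGet X p.1) (i : Int) "" == "NaN"))) = true) :
    stepA X Y (d, ys) i
      = (X.foldl (fun d p => aAppendAt d p.1 (PySem.List.pyGetD (aGet X p.1) (i : Int) "")) d,
         ys ++ [PySem.List.pyGetD Y (i : Int) ""]) := by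
  have hc : (X.any (fun p => PySem.List.pyGetD (aGet X p.1) (i : Int) "" == "NaN")) = false := by
    rw [List.any_eq_not_all_not, h]; rfl
  simp only [stepA]
  rw [hc, if_pos rfl]

-- the step on a NaN row keeps the state
theorem stepA_bad (X : List (String × List String)) (Y : List String)
    (st : (List (String × List String)) × List String) (i : Nat)
    (h : (X.all (fun p => !(PySem.List.pyGetD (aGet X p.1) (i : Int) "" == "NaN"))) = false) :
    stepA X Y st i = st := by
  have hc : (X.any (fun p => PySem.List.pyGetD (aGet X p.1) (i : Int) "" == "NaN")) = true := by
    rw [List.any_eq_not_all_not, h]; rfl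
  simp only [stepA]
  rw [hc]
  simp

-- A's interleaved row loop equals the filter-then-rebuild form, for any index list
theorem loop_lemma (X : List (String × List String)) (Y : List String)
    (hnd : (X.map Prod.fst).Nodup) (I : List Nat) :
    ∀ (f : String × List String → List String) (ys : List String),
    I.foldl (stepA X Y) (X.map (fun p => (p.1, f p)), ys)
    = (X.map (fun p => (p.1, f p ++
        ((I.filter (fun (i : Nat) => X.all (fun p => !(PySem.List.pyGetD (aGet X p.1) (i : Int) "" == "NaN")))).map
          (fun (i : Nat) => PySem.List.pyGetD p.2 (i : Int) "")))),
       ys ++ (I.filter (fun (i : Nat) => X.all (fun p => !(PySem.List.pyGetD (aGet X p.1) (i : Int) "" == "NaN")))).map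
          (fun (i : Nat) => PySem.List.pyGetD Y (i : Int) "")) := by
  induction I with
  | nil => intro f ys; simp
  | cons i I ih =>
    intro f ys
    by_cases hg : (X.all (fun p => !(PySem.List.pyGetD (aGet X p.1) (i : Int) "" == "NaN"))) = true
    · rw [List.foldl_cons, stepA_good X Y _ ys i hg]
      have hstep : X.foldl (fun d p => aAppendAt d p.1 (PySem.List.pyGetD (aGet X p.1) (i : Int) ""))
            (X.map (fun p => (p.1, f p)))
          = X.map (fun p => (p.1, f p ++ [PySem.List.pyGetD p.2 (i : Int) ""])) := by
        rw [appendAll X hnd f (fun p => PySem.List.pyGetD (aGet X p.1) (i : Int) "")]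
        refine List.map_congr_left ?_
        intro p hp
        rw [aGet_of_nodup X hnd p hp]
      rw [hstep, ih (fun p => f p ++ [PySem.List.pyGetD p.2 (i : Int) ""]) (ys ++ [PySem.List.pyGetD Y (i : Int) ""])]
      rw [List.filter_cons]
      simp only [hg, if_true]
      simp [List.append_assoc]
    · have hg' : (X.all (fun p => !(PySem.List.pyGetD (aGet X p.1) (i : Int) "" == "NaN"))) = false := by
        simpa using hg
      rw [List.foldl_cons, stepA_bad X Y _ i hg', ih f ys]
      rw [List.filter_cons]
      simp only [hg']
      simp

-- member-wise congruence for List.all (specialised helper for the predicates below)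
theorem all_congr_mem {α : Type} (l : List α) (p q : α → Bool) (h : ∀ x ∈ l, p x = q x) :
    l.all p = l.all q := by
  induction l with
  | nil => rfl
  | cons a t ih => simp only [List.all_cons, h a (by simp), ih (fun x hx => h x (by simp [hx]))]

-- shifting the index: xs[i+1] with default = xs.tail[i] with default
theorem pyGetD_succ_tail (c : List String) (i : Nat) :
    PySem.List.pyGetD c ((i + 1 : Nat) : Int) "" = PySem.List.pyGetD c.tail (i : Int) "" := by
  rw [PySem.List.pyGetD_natCast, PySem.List.pyGetD_natCast]
  cases c <;> simp

-- the row-i+1 predicate on the columns is the row-i predicate on their tails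
theorem pred_succ_tail (cols : List (List String)) (i : Nat) :
    (cols.all (fun c => !(PySem.List.pyGetD c ((i + 1 : Nat) : Int) "" == "NaN")))
      = ((cols.map List.tail).all (fun c => !(PySem.List.pyGetD c (i : Int) "" == "NaN"))) := by
  rw [List.all_map]
  congr 1
  funext c
  simp only [Function.comp]
  rw [pyGetD_succ_tail]

-- the surviving indices of n+1 rows: row 0 (if it survives) then the tails' survivors shifted
theorem goodF_succ (cols : List (List String)) (n : Nat) :
    goodF cols (n + 1)
      = (if (cols.all (fun c => !(PySem.List.pyGetD c (0 : Int) "" == "NaN"))) = true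
          then [0] else [])
        ++ (goodF (cols.map List.tail) n).map (· + 1) := by
  unfold goodF
  rw [List.range_succ_eq_map, List.filter_cons, List.filter_map]
  have hcomp : ((fun (i : Nat) => cols.all (fun c => !(PySem.List.pyGetD c (i : Int) "" == "NaN"))) ∘ Nat.succ)
      = (fun (i : Nat) => (cols.map List.tail).all (fun c => !(PySem.List.pyGetD c (i : Int) "" == "NaN"))) := by
    funext i
    simp only [Function.comp]
    exact pred_succ_tail cols i
  rw [hcomp]
  by_cases h0 : (cols.all (fun c => !(PySem.List.pyGetD c (0 : Int) "" == "NaN"))) = true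
  · simp [h0]
  · simp only [Bool.not_eq_true] at h0
    simp [h0]

-- "NaN" in heads  ↔  not every column head differs from "NaN"
theorem contains_heads (cols : List (List String)) :
    ((cols.map (fun c => PySem.List.pyGetD c (0 : Int) "")).contains "NaN")
      = !(cols.all (fun c => !(PySem.List.pyGetD c (0 : Int) "" == "NaN"))) := by
  induction cols with
  | nil => rfl
  | cons c cs ih =>
    simp only [List.map_cons, List.contains_cons, List.all_cons, Bool.not_and, ← ih,
      Bool.not_not]
    rw [BEq.comm]

-- B's recursion computes, for each column, the entries at the surviving indices
theorem goB_spec (kn : Nat) :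
    ∀ (n : Nat) (cols : List (List String)) (ys : List String), cols.length = kn →
    goB kn cols ys n
      = (cols.map (fun c => (goodF cols n).map (fun (i : Nat) => PySem.List.pyGetD c (i : Int) "")),
         (goodF cols n).map (fun (i : Nat) => PySem.List.pyGetD ys (i : Int) "")) := by
  intro n
  induction n with
  | zero =>
    intro cols ys hlen
    simp [goB, goodF, ← hlen]
  | succ n ih =>
    intro cols ys hlen
    have htl : (cols.map List.tail).length = kn := by simpa using hlen
    simp only [goB, ih (cols.map List.tail) ys.tail htl]
    rw [goodF_succ, contains_heads]
    by_cases h0 : (cols.all (fun c => !(PySem.List.pyGetD c (0 : Int) "" == "NaN"))) = true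
    · rw [h0, if_neg (show ¬((!true) = true) by simp), if_pos (show (true = true) from rfl)]
      rw [List.map_map, List.zip_map']
      refine Prod.ext ?_ ?_
      · simp only [List.map_map]
        refine List.map_congr_left ?_
        intro c _
        simp only [Function.comp, List.map_map, List.map_cons,
          List.cons_append, List.nil_append, Nat.cast_zero]
        congr 1
        refine List.map_congr_left ?_
        intro i _
        simp only [Function.comp]
        exact (pyGetD_succ_tail c i).symm
      · simp only [List.map_map, List.map_cons,
          List.cons_append, List.nil_append, Nat.cast_zero]
        congr 1
        refine List.map_congr_left ?_
        intro i _
        simp only [Function.comp]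
        exact (pyGetD_succ_tail ys i).symm
    · have h0f : (cols.all (fun c => !(PySem.List.pyGetD c (0 : Int) "" == "NaN"))) = false := by
        simpa using h0
      rw [h0f, if_pos (show ((!false) = true) by simp), if_neg (show ¬(false = true) by simp)]
      simp only [List.nil_append]
      refine Prod.ext ?_ ?_
      · simp only [List.map_map]
        refine List.map_congr_left ?_
        intro c _
        simp only [Function.comp]
        refine List.map_congr_left ?_
        intro i _
        simp only [Function.comp]
        exact (pyGetD_succ_tail c i).symm
      · simp only [List.map_map]
        refine List.map_congr_left ?_
        intro i _
        simp only [Function.comp]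
        exact (pyGetD_succ_tail ys i).symm

-- ===== VERDICT (by name: the statement is the Claim_ definition above) =====
theorem hard_clean_spec : Claim_equal_hard_clean := by
  intro X Y _ hpre
  obtain ⟨hne, hnd, _, _⟩ := hpre
  unfold Spec_hard_clean hard_clean hard_clean_alt
  -- A's side: filter-then-rebuild form
  have h0 : X.foldl (fun d p => aInsert d p.1 []) [] = X.map (fun p => (p.1, [])) := by
    simpa using foldl_aInsert_fresh X [] hnd (by simp)
  rw [h0]
  rw [loop_lemma X Y hnd (List.range (aGet X ((X.headD ("", [])).1)).length) (fun _ => []) []]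
  -- B's side: unfold the recursion via goB_spec
  dsimp only
  have hcols : (X.map Prod.fst).map (fun k => aGet X k) = X.map Prod.snd := by
    rw [List.map_map]
    exact List.map_congr_left (fun p hp => aGet_of_nodup X hnd p hp)
  have hklen : ((X.map Prod.fst).map (fun k => aGet X k)).length = (X.map Prod.fst).length := by
    simp
  rw [goB_spec (X.map Prod.fst).length _ _ Y hklen, hcols]
  -- the two survivor-index lists coincide
  have hfilt : goodF (X.map Prod.snd) (aGet X ((X.headD ("", [])).1)).length
      = (List.range (aGet X ((X.headD ("", [])).1)).length).filter
          (fun (i : Nat) => X.all (fun p => !(PySem.List.pyGetD (aGet X p.1) (i : Int) "" == "NaN"))) := by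
    unfold goodF
    refine List.filter_congr ?_
    intro i _
    rw [List.all_map]
    exact (all_congr_mem X _ _ (fun p hp => by
      simp only [Function.comp]
      rw [aGet_of_nodup X hnd p hp])).symm
  rw [hfilt]
  -- zip of the key list with the mapped column list is the mapped assoc list
  rw [show (X.map Prod.fst) = X.map (fun p => p.1) from rfl,
      show (X.map Prod.snd) = X.map (fun p => p.2) from rfl,
      List.map_map, List.zip_map']
  simp
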